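-- pv_equiv track=rewrite | github.com/belyaevsa/teamleads-2025 | scripts/topic-deep-dive-analysis.py | match_topics
-- ===== SOURCE A (Python) =====
-- def match_topics(text, topics_dict):
--     """Match text against topic keywords"""
--     if not text:
--         return []
--
--     text_lower = text.lower()
--     matched = []
--
--     for topic, keywords in topics_dict.items():
--         for keyword in keywords:
--             if keyword in text_lower:
--                 matched.append(topic)
--                 break  # One match per topic is enough
--
--     return matched
-- ===== SOURCE B (Python) =====
-- def match_topics(text, topics_dict):
--     """Match text against topic keywords: test each distinct keyword against the
--     text once, collect the keywords that occur, then list the topics having at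
--     least one matched keyword, in dict order."""
--     if not text:
--         return []
--     t = text.lower()
--     keywords = {kw for kws in topics_dict.values() for kw in kws}
--     found = {kw for kw in keywords if kw in t}
--     return [topic for topic, kws in topics_dict.items() if not found.isdisjoint(kws)]
-- ===== Notes on version B (the rewrite author's own statement) =====
-- stated objective: alternative
-- what changed: B inverts the traversal: it collects the distinct keywords of all topics, runs each substring test once per distinct keyword to build the set of keywords occurring in the text, then emits in dict order the topics whose keyword list meets that set; A instead rescans the text per topic per keyword.
import Mathlib
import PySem

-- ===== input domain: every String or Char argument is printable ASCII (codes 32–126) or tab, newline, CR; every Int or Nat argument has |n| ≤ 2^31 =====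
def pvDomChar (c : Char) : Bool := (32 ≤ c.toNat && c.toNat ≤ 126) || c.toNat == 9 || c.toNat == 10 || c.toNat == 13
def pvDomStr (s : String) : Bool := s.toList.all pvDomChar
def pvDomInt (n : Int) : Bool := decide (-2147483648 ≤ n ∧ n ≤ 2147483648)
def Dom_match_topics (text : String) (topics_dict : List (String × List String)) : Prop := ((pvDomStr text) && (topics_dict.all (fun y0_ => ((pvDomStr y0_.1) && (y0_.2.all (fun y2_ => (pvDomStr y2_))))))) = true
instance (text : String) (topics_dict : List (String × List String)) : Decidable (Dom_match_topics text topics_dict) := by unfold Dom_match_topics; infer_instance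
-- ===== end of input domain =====

-- B inverts the traversal: each distinct keyword is substring-tested once, the matched
-- keywords form a set, and topics meeting that set are emitted in dict order (alternative).


-- ===== PORT A =====
-- inner 'for keyword in keywords: … break' loop of A
def matchTopicsKwLoop (topic : String) (keywords : List String) (text_lower : String) (matched : List String) : List String :=
  match keywords with
  | [] => matched
  | keyword :: rest =>
    if PySem.Str.isIn keyword text_lower then matched ++ [topic]
    else matchTopicsKwLoop topic rest text_lower matched

def match_topics (text : String) (topics_dict : List (String × List String)) : List String :=
  if text = "" then []
  else
    let text_lower := PySem.Str.lower text
    topics_dict.foldl (fun matched p => matchTopicsKwLoop p.1 p.2 text_lower matched) []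

-- ===== PORT B =====
def match_topics_alt (text : String) (topics_dict : List (String × List String)) : List String :=
  if text = "" then []
  else
    let t := PySem.Str.lower text
    -- {kw for kws in topics_dict.values() for kw in kws}
    let keywords := PySem.Set.ofList (topics_dict.flatMap Prod.snd)
    -- {kw for kw in keywords if kw in t}
    let found := keywords.foldl (fun s kw => if PySem.Str.isIn kw t then PySem.Set.add s kw else s) PySem.Set.empty
    -- [topic for topic, kws in topics_dict.items() if not found.isdisjoint(kws)]
    (topics_dict.filter (fun p => !(PySem.Set.isdisjoint found p.2))).map Prod.fst

-- ===== PRECONDITION & SPEC =====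
def Spec_match_topics (text : String) (topics_dict : List (String × List String)) (out : List String) : Prop := out = match_topics_alt text topics_dict
instance (text : String) (topics_dict : List (String × List String)) (out : List String) : Decidable (Spec_match_topics text topics_dict out) := by unfold Spec_match_topics; infer_instance

-- ===== CLAIM =====
def Claim_equal_match_topics : Prop := ∀ (text : String) (topics_dict : List (String × List String)), Dom_match_topics text topics_dict → Spec_match_topics text topics_dict (match_topics text topics_dict)

-- ===== LEMMAS AND PROOFS =====

-- A's inner loop returns matched ++ [topic] iff some keyword is a substring
theorem kwLoop_eq (topic : String) (kws : List String) (t : String) (m : List String) :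
    matchTopicsKwLoop topic kws t m =
      if kws.any (fun k => PySem.Str.isIn k t) then m ++ [topic] else m := by
  induction kws with
  | nil => simp [matchTopicsKwLoop]
  | cons k rest ih =>
    cases h : PySem.Str.isIn k t <;>
      simp only [matchTopicsKwLoop, List.any_cons, h, Bool.true_or, Bool.false_or, if_true,
        if_false, Bool.false_eq_true, ih]

-- A's outer loop is filter-then-map
theorem foldA_eq (t : String) (td : List (String × List String)) (m : List String) :
    td.foldl (fun matched p => matchTopicsKwLoop p.1 p.2 t matched) m =
      m ++ (td.filter (fun p => p.2.any (fun k => PySem.Str.isIn k t))).map Prod.fst := by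
  induction td generalizing m with
  | nil => simp
  | cons p rest ih =>
    rw [List.foldl_cons, kwLoop_eq, List.filter_cons]
    cases h : p.2.any (fun k => PySem.Str.isIn k t) <;> simp [ih]

-- membership in B's 'found' set: built by filtering 'keywords' through the substring test
theorem mem_found (t : String) (kws : List String) (s : PySem.Set String) (x : String) :
    x ∈ kws.foldl (fun s kw => if PySem.Str.isIn kw t then PySem.Set.add s kw else s) s ↔
      x ∈ s ∨ (x ∈ kws ∧ PySem.Str.isIn x t = true) := by
  induction kws generalizing s with
  | nil => simp
  | cons k rest ih =>
    rw [List.foldl_cons, ih]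
    by_cases h : PySem.Str.isIn k t = true
    · rw [if_pos h, PySem.Set.mem_add]
      constructor
      · rintro ((hs | rfl) | ⟨hm, hi⟩)
        · exact Or.inl hs
        · exact Or.inr ⟨List.mem_cons_self .., h⟩
        · exact Or.inr ⟨List.mem_cons_of_mem _ hm, hi⟩
      · rintro (hs | ⟨hm, hi⟩)
        · exact Or.inl (Or.inl hs)
        · rcases List.mem_cons.mp hm with rfl | hm'
          · exact Or.inl (Or.inr rfl)
          · exact Or.inr ⟨hm', hi⟩
    · rw [if_neg h]
      constructor
      · rintro (hs | ⟨hm, hi⟩)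
        · exact Or.inl hs
        · exact Or.inr ⟨List.mem_cons_of_mem _ hm, hi⟩
      · rintro (hs | ⟨hm, hi⟩)
        · exact Or.inl hs
        · rcases List.mem_cons.mp hm with rfl | hm'
          · exact absurd hi h
          · exact Or.inr ⟨hm', hi⟩

-- ===== VERDICT =====
theorem match_topics_spec : Claim_equal_match_topics := by
  unfold Claim_equal_match_topics
  intro text td _
  unfold Spec_match_topics match_topics match_topics_alt
  by_cases ht : text = ""
  · rw [if_pos ht, if_pos ht]
  · rw [if_neg ht, if_neg ht]
    rw [foldA_eq, List.nil_append]
    congr 1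
    apply List.filter_congr
    intro p hp
    rw [Bool.eq_iff_iff, List.any_eq_true, Bool.not_eq_true', ← Bool.not_eq_true,
      PySem.Set.isdisjoint_iff]
    push Not
    constructor
    · rintro ⟨k, hk, hi⟩
      refine ⟨k, ?_, hk⟩
      rw [mem_found]
      exact Or.inr ⟨(PySem.Set.mem_ofList _ _).mpr (List.mem_flatMap.mpr ⟨p, hp, hk⟩), hi⟩
    · rintro ⟨k, hkf, hk⟩
      rw [mem_found] at hkf
      rcases hkf with h | ⟨_, hi⟩
      · exact absurd h (by simp [PySem.Set.empty])
      · exact ⟨k, hk, hi⟩
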